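-- pv_equiv track=rewrite | github.com/TessFerrandez/algorithms | graph/lc-h-2157-groups-of-strings.py | groupStrings2
-- ===== SOURCE A (Python) =====
-- from typing import List
-- from collections import defaultdict, deque, Counter
--
-- def groupStrings2(words: List[str]) -> List[int]:
--     n = len(words)
--     graph = {}
--     groups = []
--
--     def find(x):
--         if x != groups[x]:
--             groups[x] = find(groups[x])
--         return groups[x]
--
--     def connected(word):
--         for i in range(26):
--             yield word ^ (1 << i)
--             if (word & (1 << i)) > 0:
--                 for j in range(26):
--                     if word & (1 << j) == 0:
--                         yield word ^ (1 << i) ^ (1 << j)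
--
--     for i, word in enumerate(words):
--         word_bitmask = sum(1 << (ord(char) - ord('a')) for char in word)
--         groups.append(graph.setdefault(word_bitmask, i))
--         for word2 in connected(word_bitmask):
--             if word2 in graph:
--                 i, j = find(graph[word_bitmask]), find(graph[word2])
--                 if i != j:
--                     groups[i] = j
--
--     count = Counter(find(i) for i in range(n))
--     return [len(count), max(count.values())]
-- ===== SOURCE B (Python) =====
-- from collections import Counter
--
--
-- def _neighbors(m):
--     # all masks reachable by adding, deleting or replacing one of the 26 letters
--     out = []
--     for i in range(26):
--         out.append(m ^ (1 << i))
--         if m & (1 << i):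
--             for j in range(26):
--                 if not m & (1 << j):
--                     out.append(m ^ (1 << i) ^ (1 << j))
--     return out
--
--
-- def groupStrings2(words):
--     # label-propagation: labels[i] is the component label of word i; merging two
--     # components rewrites every occurrence of the absorbed label (no union-find forest)
--     labels = []
--     first = {}          # bitmask -> first index carrying it
--     for i, w in enumerate(words):
--         m = sum(1 << (ord(c) - ord('a')) for c in w)
--         if m in first:
--             labels.append(labels[first[m]])
--         else:
--             first[m] = i
--             labels.append(i)
--         cur = labels[i]
--         for m2 in _neighbors(m):
--             j = first.get(m2)
--             if j is not None and labels[j] != cur: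
--                 old = labels[j]
--                 labels = [cur if l == old else l for l in labels]
--     cnt = Counter(labels)
--     return [len(cnt), max(cnt.values())]
-- ===== Notes on version B (the rewrite author's own statement) =====
-- stated objective: alternative
-- what changed: Replaces the union-find forest (parent array with recursive path-compressing find) by flat label propagation: a labels list where merging two components rewrites every occurrence of the absorbed label, and the final tally is a plain Counter over the labels with no find calls.
import Mathlib
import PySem

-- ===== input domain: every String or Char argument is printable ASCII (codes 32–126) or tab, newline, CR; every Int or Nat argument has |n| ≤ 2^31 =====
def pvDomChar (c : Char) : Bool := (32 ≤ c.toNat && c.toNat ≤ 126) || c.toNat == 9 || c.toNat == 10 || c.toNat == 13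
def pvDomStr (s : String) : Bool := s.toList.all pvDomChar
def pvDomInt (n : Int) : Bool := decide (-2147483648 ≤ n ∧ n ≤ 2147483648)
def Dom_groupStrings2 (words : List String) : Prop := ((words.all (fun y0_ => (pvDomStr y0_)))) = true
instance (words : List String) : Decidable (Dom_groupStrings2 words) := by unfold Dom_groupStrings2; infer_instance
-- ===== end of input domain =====

-- B replaces A's union-find forest by flat label propagation over a labels list; return values proved equal on Pre_ (A mutates nothing observable).

-- ===== PORT A =====

-- word_bitmask = sum(1 << (ord(char) - ord('a')) for char in word); exact for chars ≥ 'a' (Pre_)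
def maskOf (w : String) : Int :=
  ((w.toList).map (fun c => (1 : Int) <<< (c.toNat - 97))).sum

-- the 'connected' generator, flattened into a list in yield order
def connectedList (m : Int) : List Int :=
  (List.range 26).flatMap (fun i =>
    [PySem.Int.bxor m ((1 : Int) <<< i)] ++
    (if 0 < PySem.Int.band m ((1 : Int) <<< i) then
      (List.range 26).flatMap (fun j =>
        if PySem.Int.band m ((1 : Int) <<< j) = 0 then
          [PySem.Int.bxor (PySem.Int.bxor m ((1 : Int) <<< i)) ((1 : Int) <<< j)]
        else [])
     else []))

-- def find(x): path-compressing find, fuelled (fuel = current list length always suffices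
-- on the states A reaches); the pyGetD default x is the fuel-guard, never hit on those states
def findA : Nat → List Int → Int → Int × List Int
  | 0, g, x => (x, g)
  | f + 1, g, x =>
    let p := PySem.List.pyGetD g x x
    if p = x then (x, g)
    else
      let pr := findA f g p
      (pr.1, PySem.List.pySetD pr.2 x pr.1)

-- body of 'for word2 in connected(word_bitmask): …' (graph is fixed inside this loop)
def stepNbrA (graph : PySem.Dict Int Int) (m : Int) (g : List Int) (m2 : Int) : List Int :=
  match graph.get? m2 with
  | none => g
  | some t =>
    let pr1 := findA g.length g (graph.getD m 0)
    let pr2 := findA pr1.2.length pr1.2 t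
    if pr1.1 ≠ pr2.1 then PySem.List.pySetD pr2.2 pr1.1 pr2.1 else pr2.2

-- body of 'for i, word in enumerate(words): …'
def stepWordA (st : PySem.Dict Int Int × List Int) (iw : Int × String) :
    PySem.Dict Int Int × List Int :=
  let m := maskOf iw.2
  let graph' := st.1.setdefault m iw.1
  let g' := st.2 ++ [(st.1.get? m).getD iw.1]
  (graph', (connectedList m).foldl (stepNbrA graph' m) g')

def groupStrings2 (words : List String) : List Int :=
  let st := (PySem.List.enumerate words).foldl stepWordA (PySem.Dict.empty, [])
  let fin := (PySem.List.pyRange 0 (words.length : Int) 1).foldl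
    (fun (p : PySem.Dict Int Int × List Int) i =>
      let pr := findA p.2.length p.2 i
      (p.1.modify pr.1 0 (· + 1), pr.2))
    (PySem.Dict.empty, st.2)
  [(fin.1.size : Int), (PySem.List.max? fin.1.values (fun v => v)).getD 0]

-- ===== PORT B =====

-- body of 'for m2 in _neighbors(m): …' (first and cur are fixed inside this loop)
def stepNbrB (first : PySem.Dict Int Int) (cur : Int) (labels : List Int) (m2 : Int) :
    List Int :=
  match first.get? m2 with
  | none => labels
  | some j =>
    let old := PySem.List.pyGetD labels j 0
    if old ≠ cur then labels.map (fun l => if l = old then cur else l) else labels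

-- body of 'for i, w in enumerate(words): …'
def stepWordB (st : PySem.Dict Int Int × List Int) (iw : Int × String) :
    PySem.Dict Int Int × List Int :=
  let m := maskOf iw.2
  let (first', labels') :=
    match st.1.get? m with
    | some v => (st.1, st.2 ++ [PySem.List.pyGetD st.2 v 0])
    | none => (st.1.insert m iw.1, st.2 ++ [iw.1])
  let cur := PySem.List.pyGetD labels' iw.1 0
  (first', (connectedList m).foldl (stepNbrB first' cur) labels')

def groupStrings2_alt (words : List String) : List Int :=
  let st := (PySem.List.enumerate words).foldl stepWordB (PySem.Dict.empty, [])
  let cnt := PySem.Dict.counter st.2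
  [(cnt.size : Int), (PySem.List.max? cnt.values (fun v => v)).getD 0]

-- ===== PRECONDITION & SPEC =====
-- Pre_ excludes exactly the inputs where Python A raises: an empty list (max() of an empty
-- Counter, ValueError) and any word with a character below 'a' (negative shift, ValueError).
def Pre_groupStrings2 (words : List String) : Prop :=
  words ≠ [] ∧ words.all (fun w => w.toList.all (fun c => 97 ≤ c.toNat)) = true
instance (words : List String) : Decidable (Pre_groupStrings2 words) := by
  unfold Pre_groupStrings2; infer_instance

def pvWitness_groupStrings2 : List String := ["ab", "b", "bc"]

def Spec_groupStrings2 (words : List String) (out : List Int) : Prop := out = groupStrings2_alt words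
instance (words : List String) (out : List Int) : Decidable (Spec_groupStrings2 words out) := by unfold Spec_groupStrings2; infer_instance

-- ===== CLAIM (what is proved, stated in full; the proofs are below) =====
def Claim_equal_groupStrings2 : Prop := ∀ (words : List String), Dom_groupStrings2 words → Pre_groupStrings2 words → Spec_groupStrings2 words (groupStrings2 words)

-- ===== LEMMAS AND PROOFS =====

def par (g : List Int) (x : Int) : Int := PySem.List.pyGetD g x x

def iterP (g : List Int) : Nat → Int → Int
  | 0, x => x
  | k + 1, x => iterP g k (par g x)

def rootU (g : List Int) (x : Int) : Int := iterP g g.length x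

def isRootP (g : List Int) (x : Int) : Prop := par g x = x

def ValidU (g : List Int) : Prop :=
  ∀ x : Int, 0 ≤ x → x < (g.length : Int) → 0 ≤ par g x ∧ par g x < (g.length : Int)

def DecRk (g : List Int) (rk : Int → Nat) : Prop :=
  ∀ x : Int, 0 ≤ x → x < (g.length : Int) → par g x ≠ x → rk (par g x) < rk x

def InvU (g : List Int) : Prop := ValidU g ∧ ∃ rk, DecRk g rk

-- basic par facts
theorem par_of_ge (g : List Int) (x : Int) (h : (g.length : Int) ≤ x) : par g x = x := by
  unfold par
  rw [PySem.List.pyGetD_of_nonneg g x (by omega)]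
  rw [List.getD_eq_getElem?_getD, List.getElem?_eq_none (by omega)]
  rfl

theorem par_set (g : List Int) (x v y : Int) (hx0 : 0 ≤ x) (hxl : x < (g.length : Int))
    (hy : 0 ≤ y) :
    par (PySem.List.pySetD g x v) y = if y = x then v else par g y := by
  unfold par
  rw [PySem.List.pySetD_of_nonneg g v hx0, PySem.List.pyGetD_of_nonneg _ y hy,
    PySem.List.pyGetD_of_nonneg g y hy]
  rw [List.getD_eq_getElem?_getD, List.getD_eq_getElem?_getD, List.getElem?_set]
  have : y = x ↔ x.toNat = y.toNat := by omega
  split_ifs with h1 h2 h2 <;> simp_all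



theorem iterP_succ_right (g : List Int) (k : Nat) (x : Int) :
    iterP g (k + 1) x = par g (iterP g k x) := by
  induction k generalizing x with
  | zero => rfl
  | succ k ih =>
    show iterP g (k+1) (par g x) = par g (iterP g (k+1) x)
    rw [ih (par g x)]
    show par g (iterP g k (par g x)) = par g (iterP g (k+1) x)
    rfl

theorem iterP_add (g : List Int) (a b : Nat) (x : Int) :
    iterP g (a + b) x = iterP g b (iterP g a x) := by
  induction b generalizing x with
  | zero => rfl
  | succ b ih =>
    rw [show a + (b+1) = (a+b)+1 from by omega, iterP_succ_right, iterP_succ_right, ih]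

theorem iterP_of_isRoot (g : List Int) (k : Nat) (x : Int) (h : isRootP g x) :
    iterP g k x = x := by
  induction k with
  | zero => rfl
  | succ k ih => rw [iterP_succ_right, ih, h]

theorem iterP_stable (g : List Int) (k m : Nat) (x : Int) (h : isRootP g (iterP g k x)) :
    iterP g (k + m) x = iterP g k x := by
  rw [iterP_add, iterP_of_isRoot _ _ _ h]

theorem root_unique (g : List Int) (a b : Nat) (x : Int)
    (ha : isRootP g (iterP g a x)) (hb : isRootP g (iterP g b x)) :
    iterP g a x = iterP g b x := by
  rcases Nat.le_total a b with h | h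
  · rw [← Nat.add_sub_cancel' h, iterP_stable g a _ x ha]
  · rw [← Nat.add_sub_cancel' h, iterP_stable g b _ x hb]

-- termination: from a decreasing rank, every nonnegative node reaches a root
theorem exists_root (g : List Int) (rk : Int → Nat) (hv : ValidU g) (hrk : DecRk g rk)
    (x : Int) (hx : 0 ≤ x) : ∃ k, isRootP g (iterP g k x) := by
  by_cases hlt : x < (g.length : Int)
  · induction hn : rk x using Nat.strong_induction_on generalizing x with
    | _ n ih =>
      by_cases hr : par g x = x
      · exact ⟨0, hr⟩
      · obtain ⟨hp0, hpl⟩ := hv x hx hlt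
        obtain ⟨k, hk⟩ := ih (rk (par g x)) (hn ▸ hrk x hx hlt hr) (par g x) hp0 hpl rfl
        exact ⟨k + 1, by rwa [show iterP g (k+1) x = iterP g k (par g x) from rfl]⟩
  · exact ⟨0, par_of_ge g x (by omega)⟩

-- along a minimal chain the rank strictly decreases and nodes stay in range
theorem chain_facts (g : List Int) (rk : Int → Nat) (hv : ValidU g) (hrk : DecRk g rk)
    (x : Int) (hx0 : 0 ≤ x) (hxl : x < (g.length : Int)) (k : Nat)
    (hmin : ∀ j < k, ¬ isRootP g (iterP g j x)) :
    ∀ j ≤ k, (0 ≤ iterP g j x ∧ iterP g j x < (g.length : Int)) ∧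
      (∀ j' < j, rk (iterP g j x) < rk (iterP g j' x)) := by
  intro j hj
  induction j with
  | zero => exact ⟨⟨hx0, hxl⟩, by omega⟩
  | succ j ih =>
    obtain ⟨⟨h0, hl⟩, hlt⟩ := ih (by omega)
    have hnr : ¬ isRootP g (iterP g j x) := hmin j (by omega)
    have hstep : rk (iterP g (j+1) x) < rk (iterP g j x) := by
      rw [iterP_succ_right]; exact hrk _ h0 hl hnr
    have hb := hv _ h0 hl
    rw [← iterP_succ_right] at hb
    refine ⟨hb, ?_⟩
    intro j' hj'
    rcases Nat.lt_succ_iff_lt_or_eq.mp hj' with h | h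
    · exact lt_trans hstep (hlt j' h)
    · rw [h]; exact hstep

-- a minimal chain has pairwise-distinct nodes, so its length is < g.length
theorem depth_lt (g : List Int) (rk : Int → Nat) (hv : ValidU g) (hrk : DecRk g rk)
    (x : Int) (hx0 : 0 ≤ x) (hxl : x < (g.length : Int)) :
    ∃ k, k < g.length ∧ isRootP g (iterP g k x) ∧
      0 ≤ iterP g k x ∧ iterP g k x < (g.length : Int) := by
  obtain ⟨k0, hk0⟩ := exists_root g rk hv hrk x hx0
  classical
  have hex : ∃ k, isRootP g (iterP g k x) := ⟨k0, hk0⟩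
  let k := Nat.find hex
  have hkroot : isRootP g (iterP g k x) := Nat.find_spec hex
  have hmin : ∀ j < k, ¬ isRootP g (iterP g j x) := fun j hj => Nat.find_min hex hj
  have hcf := chain_facts g rk hv hrk x hx0 hxl k hmin
  refine ⟨k, ?_, hkroot, (hcf k (by omega)).1.1, (hcf k (by omega)).1.2⟩
  -- the k+1 nodes iterP g 0 x, …, iterP g k x are distinct ints in [0, g.length)
  have hnd : ((List.range (k+1)).map (fun j => (iterP g j x).toNat)).Nodup := by
    refine List.Nodup.map_on ?_ (List.nodup_range)
    intro a ha b hb hab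
    simp only [List.mem_range] at ha hb
    by_contra hne
    have ea := (hcf a (by omega)).1
    have eb := (hcf b (by omega)).1
    have heq : iterP g a x = iterP g b x := by omega
    rcases Nat.lt_or_ge a b with h | h
    · have := (hcf b (by omega)).2 a h
      rw [heq] at this
      omega
    · have := (hcf a (by omega)).2 b (by omega)
      rw [← heq] at this
      omega
  have hsub : ((List.range (k+1)).map (fun j => (iterP g j x).toNat)).toFinset ⊆
      Finset.range g.length := by
    intro a ha
    simp only [List.mem_toFinset, List.mem_map, List.mem_range] at ha
    obtain ⟨j, hj, rfl⟩ := ha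
    have := (hcf j (by omega)).1
    simp only [Finset.mem_range]
    omega
  have hlen := Finset.card_le_card hsub
  rw [List.toFinset_card_of_nodup hnd] at hlen
  simp at hlen
  omega

theorem rootU_spec (g : List Int) (hinv : InvU g) (x : Int) (hx0 : 0 ≤ x)
    (hxl : x < (g.length : Int)) :
    isRootP g (rootU g x) ∧ 0 ≤ rootU g x ∧ rootU g x < (g.length : Int) := by
  obtain ⟨hv, rk, hrk⟩ := hinv
  obtain ⟨k, hk, hroot, h0, hl⟩ := depth_lt g rk hv hrk x hx0 hxl
  have : rootU g x = iterP g k x := by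
    unfold rootU
    rw [show g.length = k + (g.length - k) from by omega]
    exact iterP_stable g k _ x hroot
  rw [this]
  exact ⟨hroot, h0, hl⟩

theorem rootU_eq_iter (g : List Int) (hinv : InvU g) (x : Int) (hx0 : 0 ≤ x)
    (hxl : x < (g.length : Int)) (k : Nat) (h : isRootP g (iterP g k x)) :
    rootU g x = iterP g k x :=
  root_unique g g.length k x (rootU_spec g hinv x hx0 hxl).1 h

theorem rootU_of_isRoot (g : List Int) (x : Int) (h : isRootP g x) : rootU g x = x :=
  iterP_of_isRoot g g.length x h

theorem rootU_par (g : List Int) (hinv : InvU g) (x : Int) (hx0 : 0 ≤ x)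
    (hxl : x < (g.length : Int)) : rootU g (par g x) = rootU g x := by
  have h1 : isRootP g (iterP g g.length x) := (rootU_spec g hinv x hx0 hxl).1
  have h2 : iterP g (g.length + 1) x = iterP g g.length x := iterP_stable g g.length 1 x h1
  have h3 : iterP g (g.length + 1) x = iterP g g.length (par g x) := by
    rw [show g.length + 1 = 1 + g.length from by omega, iterP_add]; rfl
  unfold rootU
  rw [← h3, h2]

theorem rootU_of_ge (g : List Int) (x : Int) (h : (g.length : Int) ≤ x) : rootU g x = x :=
  rootU_of_isRoot g x (par_of_ge g x h)

theorem rk_root_lt (g : List Int) (rk : Int → Nat) (hv : ValidU g) (hrk : DecRk g rk)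
    (x : Int) (hx0 : 0 ≤ x) (hxl : x < (g.length : Int)) (hnr : par g x ≠ x) :
    rk (rootU g x) < rk x := by
  classical
  have hex : ∃ k, isRootP g (iterP g k x) := exists_root g rk hv hrk x hx0
  have hkroot := Nat.find_spec hex
  have hmin : ∀ j < Nat.find hex, ¬ isRootP g (iterP g j x) := fun j hj => Nat.find_min hex hj
  have hcf := chain_facts g rk hv hrk x hx0 hxl (Nat.find hex) hmin
  have hkpos : 0 < Nat.find hex := by
    rcases Nat.eq_zero_or_pos (Nat.find hex) with h | h
    · rw [h] at hkroot; exact absurd hkroot hnr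
    · exact h
  have := (hcf (Nat.find hex) (le_refl _)).2 0 hkpos
  rwa [rootU_eq_iter g ⟨hv, rk, hrk⟩ x hx0 hxl _ hkroot]

-- path-compression step: repointing a node to its root preserves lengths, invariants and all roots
theorem setRoot_spec (g : List Int) (x : Int) (hinv : InvU g) (hx0 : 0 ≤ x)
    (hxl : x < (g.length : Int)) (hnr : par g x ≠ x) :
    (PySem.List.pySetD g x (rootU g x)).length = g.length ∧
    ValidU (PySem.List.pySetD g x (rootU g x)) ∧
    (∀ rk, DecRk g rk → DecRk (PySem.List.pySetD g x (rootU g x)) rk) ∧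
    (∀ y, 0 ≤ y → rootU (PySem.List.pySetD g x (rootU g x)) y = rootU g y) := by
  set r := rootU g x with hr
  set g' := PySem.List.pySetD g x r with hg'
  obtain ⟨hrroot, hr0, hrl⟩ := rootU_spec g hinv x hx0 hxl
  have hlen : g'.length = g.length := PySem.List.length_pySetD g x r
  have hrx : r ≠ x := fun h => hnr (by rw [← h] at hnr ⊢; exact hrroot)
  have hpar : ∀ y, 0 ≤ y → par g' y = if y = x then r else par g y :=
    fun y hy => par_set g x r y hx0 hxl hy
  have hval : ValidU g' := by
    intro y hy0 hyl
    rw [hlen] at hyl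
    rw [hpar y hy0]
    split_ifs with h
    · omega
    · have := hinv.1 y hy0 hyl; omega
  have hdec : ∀ rk, DecRk g rk → DecRk g' rk := by
    intro rk hrk y hy0 hyl hnr'
    rw [hlen] at hyl
    rw [hpar y hy0] at hnr' ⊢
    by_cases h : y = x
    · rw [if_pos h] at hnr' ⊢
      subst h
      exact rk_root_lt g rk hinv.1 hrk y hy0 hyl hnr
    · rw [if_neg h] at hnr' ⊢
      exact hrk y hy0 hyl hnr'
  have hinv' : InvU g' := by
    obtain ⟨rk, hrk⟩ := hinv.2
    refine ⟨hval, rk, hdec rk hrk⟩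
  have claim : ∀ k y, 0 ≤ y → isRootP g (iterP g k y) →
      ∃ m, isRootP g' (iterP g' m y) ∧ iterP g' m y = iterP g k y := by
    intro k
    induction k with
    | zero =>
      intro y hy0 hroot
      refine ⟨0, ?_, rfl⟩
      have hroot' : isRootP g y := hroot
      have hyx : y ≠ x := fun h => hnr (by rw [← h] at hnr ⊢; exact hroot')
      show par g' y = y
      rw [hpar y hy0, if_neg hyx]; exact hroot'
    | succ k ih =>
      intro y hy0 hroot
      by_cases hyr : isRootP g y
      · refine ⟨0, ?_, ?_⟩
        · have hyx : y ≠ x := fun h => hnr (by rw [← h] at hnr ⊢; exact hyr)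
          show par g' y = y
          rw [hpar y hy0, if_neg hyx]; exact hyr
        · rw [iterP_of_isRoot g _ y hyr]; rfl
      · by_cases hyx : y = x
        · have h1 : iterP g' 1 y = r := by
            show par g' y = r
            rw [hpar y hy0, if_pos hyx]
          refine ⟨1, ?_, ?_⟩
          · show isRootP g' (iterP g' 1 y)
            rw [h1]
            show par g' r = r
            rw [hpar r hr0, if_neg hrx]; exact hrroot
          · rw [hyx] at hroot h1 ⊢
            rw [h1, hr]
            exact rootU_eq_iter g hinv x hx0 hxl (k+1) hroot
        · have hyl : y < (g.length : Int) := by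
            by_contra h
            exact hyr (par_of_ge g y (by omega))
          obtain ⟨hp0, hpl⟩ := hinv.1 y hy0 hyl
          have hroot' : isRootP g (iterP g k (par g y)) := hroot
          obtain ⟨m, hm1, hm2⟩ := ih (par g y) hp0 hroot'
          refine ⟨m + 1, ?_, ?_⟩
          · show isRootP g' (iterP g' m (par g' y))
            rw [hpar y hy0, if_neg hyx]; exact hm1
          · show iterP g' m (par g' y) = iterP g k (par g y)
            rw [hpar y hy0, if_neg hyx]; exact hm2
  refine ⟨hlen, hval, hdec, ?_⟩
  intro y hy0
  by_cases hyl : y < (g.length : Int)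
  · obtain ⟨hroot, h0, hl⟩ := rootU_spec g hinv y hy0 hyl
    obtain ⟨m, hm1, hm2⟩ := claim g.length y hy0 hroot
    have := rootU_eq_iter g' hinv' y hy0 (by rw [hlen]; exact hyl) m hm1
    rw [this, hm2]
    rfl
  · rw [rootU_of_ge g y (by omega), rootU_of_ge g' y (by rw [hlen]; omega)]

-- union step: pointing root r1 at root r2 merges exactly the two classes
theorem union_spec (g : List Int) (r1 r2 : Int) (hinv : InvU g)
    (h10 : 0 ≤ r1) (h1l : r1 < (g.length : Int)) (h20 : 0 ≤ r2) (h2l : r2 < (g.length : Int))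
    (hr1 : isRootP g r1) (hr2 : isRootP g r2) (hne : r1 ≠ r2) :
    (PySem.List.pySetD g r1 r2).length = g.length ∧
    InvU (PySem.List.pySetD g r1 r2) ∧
    (∀ y, 0 ≤ y → rootU (PySem.List.pySetD g r1 r2) y =
      if rootU g y = r1 then r2 else rootU g y) := by
  set g' := PySem.List.pySetD g r1 r2 with hg'
  have hlen : g'.length = g.length := PySem.List.length_pySetD g r1 r2
  have hpar : ∀ y, 0 ≤ y → par g' y = if y = r1 then r2 else par g y :=
    fun y hy => par_set g r1 r2 y h10 h1l hy
  have hval : ValidU g' := by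
    intro y hy0 hyl
    rw [hlen] at hyl
    rw [hpar y hy0]
    split_ifs with h
    · omega
    · have := hinv.1 y hy0 hyl; omega
  have hinv' : InvU g' := by
    obtain ⟨rk, hrk⟩ := hinv.2
    refine ⟨hval, fun y => if rootU g y = r1 then rk y + rk r2 + 1 else rk y, ?_⟩
    intro y hy0 hyl hnr'
    rw [hlen] at hyl
    rw [hpar y hy0] at hnr' ⊢
    by_cases h : y = r1
    · rw [if_pos h] at hnr' ⊢
      subst h
      simp only []
      rw [if_pos (rootU_of_isRoot g y hr1), if_neg (by rw [rootU_of_isRoot g r2 hr2]; exact fun hh => hne hh.symm)]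
      omega
    · rw [if_neg h] at hnr' ⊢
      simp only []
      rw [rootU_par g hinv y hy0 hyl]
      have := hrk y hy0 hyl hnr'
      split_ifs <;> omega
  have base : ∀ y, 0 ≤ y → isRootP g y →
      ∃ m, isRootP g' (iterP g' m y) ∧ iterP g' m y = (if y = r1 then r2 else y) := by
    intro y hy0 hroot'
    by_cases h : y = r1
    · have h1 : iterP g' 1 y = r2 := by
        show par g' y = r2
        rw [hpar y hy0, if_pos h]
      refine ⟨1, ?_, ?_⟩
      · rw [h1]
        show par g' r2 = r2
        rw [hpar r2 h20, if_neg (fun hh => hne hh.symm)]; exact hr2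
      · rw [h1, if_pos h]
    · refine ⟨0, ?_, ?_⟩
      · show par g' y = y
        rw [hpar y hy0, if_neg h]; exact hroot'
      · show y = _
        rw [if_neg h]
  have claim : ∀ k y, 0 ≤ y → isRootP g (iterP g k y) →
      ∃ m, isRootP g' (iterP g' m y) ∧
        iterP g' m y = (if iterP g k y = r1 then r2 else iterP g k y) := by
    intro k
    induction k with
    | zero =>
      intro y hy0 hroot
      exact base y hy0 hroot
    | succ k ih =>
      intro y hy0 hroot
      by_cases hyr : isRootP g y
      · rw [iterP_of_isRoot g (k+1) y hyr]
        exact base y hy0 hyr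
      · have hyl : y < (g.length : Int) := by
          by_contra h
          exact hyr (par_of_ge g y (by omega))
        have hy1 : y ≠ r1 := fun h => hyr (h ▸ hr1)
        obtain ⟨hp0, hpl⟩ := hinv.1 y hy0 hyl
        obtain ⟨m, hm1, hm2⟩ := ih (par g y) hp0 hroot
        refine ⟨m + 1, ?_, ?_⟩
        · show isRootP g' (iterP g' m (par g' y))
          rw [hpar y hy0, if_neg hy1]; exact hm1
        · show iterP g' m (par g' y) = _
          rw [hpar y hy0, if_neg hy1]; exact hm2
  refine ⟨hlen, hinv', ?_⟩
  intro y hy0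
  by_cases hyl : y < (g.length : Int)
  · obtain ⟨hroot, h0, hl⟩ := rootU_spec g hinv y hy0 hyl
    obtain ⟨m, hm1, hm2⟩ := claim g.length y hy0 hroot
    have := rootU_eq_iter g' hinv' y hy0 (by rw [hlen]; exact hyl) m hm1
    rw [this, hm2]
    rfl
  · have hy1 : y ≠ r1 := by omega
    rw [rootU_of_ge g y (by omega), rootU_of_ge g' y (by rw [hlen]; omega), if_neg hy1]

theorem findA_spec (fuel : Nat) (g : List Int) (x : Int) (rk : Int → Nat)
    (hv : ValidU g) (hrk : DecRk g rk) (hx0 : 0 ≤ x) (hxl : x < (g.length : Int))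
    (hfuel : ∃ k, k ≤ fuel ∧ isRootP g (iterP g k x)) :
    (findA fuel g x).1 = rootU g x ∧
    (findA fuel g x).2.length = g.length ∧
    ValidU (findA fuel g x).2 ∧ DecRk (findA fuel g x).2 rk ∧
    (∀ y, 0 ≤ y → rootU (findA fuel g x).2 y = rootU g y) ∧
    (∀ y, 0 ≤ y → par (findA fuel g x).2 y ≠ par g y → rk y ≤ rk x) := by
  induction fuel generalizing g x with
  | zero =>
    obtain ⟨k, hk, hroot⟩ := hfuel
    have hk0 : k = 0 := by omega
    rw [hk0] at hroot
    have hroot' : isRootP g x := hroot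
    show x = rootU g x ∧ _
    refine ⟨(rootU_of_isRoot g x hroot').symm, rfl, hv, hrk, fun y _ => rfl, fun y _ h => absurd rfl h⟩
  | succ f ih =>
    by_cases hp : par g x = x
    · have hp' : PySem.List.pyGetD g x x = x := hp
      have : findA (f+1) g x = (x, g) := by
        show (if PySem.List.pyGetD g x x = x then (x, g) else _) = (x, g)
        rw [if_pos hp']
      rw [this]
      exact ⟨(rootU_of_isRoot g x hp).symm, rfl, hv, hrk, fun y _ => rfl, fun y _ h => absurd rfl h⟩
    · have heq : findA (f+1) g x =
          ((findA f g (par g x)).1, PySem.List.pySetD (findA f g (par g x)).2 x (findA f g (par g x)).1) := by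
        have hp' : ¬ PySem.List.pyGetD g x x = x := hp
        show (if PySem.List.pyGetD g x x = x then (x, g) else _) = _
        rw [if_neg hp']
        rfl
      obtain ⟨hp0, hpl⟩ := hv x hx0 hxl
      have hfuel' : ∃ k, k ≤ f ∧ isRootP g (iterP g k (par g x)) := by
        obtain ⟨k, hk, hroot⟩ := hfuel
        cases k with
        | zero => exact absurd hroot hp
        | succ k => exact ⟨k, by omega, hroot⟩
      obtain ⟨h1, h2, h3, h4, h5, h6⟩ := ih g (par g x) hv hrk hp0 hpl hfuel'
      set g1 := (findA f g (par g x)).2 with hg1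
      set r := (findA f g (par g x)).1 with hrr
      have hrx : r = rootU g x := by rw [h1, rootU_par g ⟨hv, rk, hrk⟩ x hx0 hxl]
      have hparg1x : par g1 x = par g x := by
        by_contra hcon
        have := h6 x hx0 hcon
        have := hrk x hx0 hxl hp
        omega
      have hnr1 : par g1 x ≠ x := by rw [hparg1x]; exact hp
      have hx1l : x < (g1.length : Int) := by rw [h2]; exact hxl
      have hr1 : rootU g1 x = r := by rw [h5 x hx0, hrx]
      obtain ⟨s1, s2, s3, s4⟩ := setRoot_spec g1 x ⟨h3, rk, h4⟩ hx0 hx1l hnr1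
      rw [hr1] at s1 s2 s3 s4
      rw [heq]
      refine ⟨hrx, ?_, s2, s3 rk h4, ?_, ?_⟩
      · rw [s1, h2]
      · intro y hy0
        rw [s4 y hy0, h5 y hy0]
      · intro y hy0 hchange
        by_cases hyx : y = x
        · rw [hyx]
        · have hpar2 : par (PySem.List.pySetD g1 x r) y = par g1 y :=  by
            rw [par_set g1 x r y hx0 hx1l hy0, if_neg hyx]
          rw [hpar2] at hchange
          have : par g1 y ≠ par g y := hchange
          have h7 := h6 y hy0 this
          have := hrk x hx0 hxl hp
          omega

-- value of B's labels list at an index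
def labv (lab : List Int) (j : Int) : Int := PySem.List.pyGetD lab j 0

theorem pyGetD_append_lt {α : Type} (l : List α) (v : α) (y : Int) (d : α)
    (hy0 : 0 ≤ y) (hyl : y < (l.length : Int)) :
    PySem.List.pyGetD (l ++ [v]) y d = PySem.List.pyGetD l y d := by
  rw [PySem.List.pyGetD_of_nonneg _ d hy0, PySem.List.pyGetD_of_nonneg _ d hy0]
  rw [List.getD_eq_getElem?_getD, List.getD_eq_getElem?_getD, List.getElem?_append_left (by omega)]

theorem pyGetD_append_self {α : Type} (l : List α) (v : α) (d : α) :
    PySem.List.pyGetD (l ++ [v]) (l.length : Int) d = v := by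
  rw [PySem.List.pyGetD_of_nonneg _ d (by omega)]
  simp

theorem par_append_lt (g : List Int) (v y : Int) (hy0 : 0 ≤ y) (hyl : y < (g.length : Int)) :
    par (g ++ [v]) y = par g y := by
  unfold par; exact pyGetD_append_lt g v y y hy0 hyl

theorem par_append_self (g : List Int) (v : Int) : par (g ++ [v]) (g.length : Int) = v := by
  unfold par; exact pyGetD_append_self g v _

theorem iterP_append (g : List Int) (v : Int) (hv : ValidU g) (k : Nat) (y : Int)
    (hy0 : 0 ≤ y) (hyl : y < (g.length : Int)) :
    iterP (g ++ [v]) k y = iterP g k y := by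
  induction k generalizing y with
  | zero => rfl
  | succ k ih =>
    show iterP (g ++ [v]) k (par (g ++ [v]) y) = iterP g k (par g y)
    rw [par_append_lt g v y hy0 hyl]
    obtain ⟨h0, hl⟩ := hv y hy0 hyl
    exact ih (par g y) h0 hl

theorem append_spec (g : List Int) (v : Int) (hinv : InvU g) (hv0 : 0 ≤ v)
    (hvl : v ≤ (g.length : Int)) :
    InvU (g ++ [v]) ∧
    (∀ y, 0 ≤ y → y < (g.length : Int) → rootU (g ++ [v]) y = rootU g y) ∧
    rootU (g ++ [v]) (g.length : Int) =
      (if v = (g.length : Int) then (g.length : Int) else rootU g v) := by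
  have hlen : (g ++ [v]).length = g.length + 1 := by simp
  have hval : ValidU (g ++ [v]) := by
    intro y hy0 hyl
    rw [hlen] at hyl
    by_cases h : y < (g.length : Int)
    · rw [par_append_lt g v y hy0 h]
      have := hinv.1 y hy0 h; omega
    · have hy : y = (g.length : Int) := by omega
      rw [hy, par_append_self g v]; omega
  have hinv' : InvU (g ++ [v]) := by
    obtain ⟨rk, hrk⟩ := hinv.2
    refine ⟨hval, fun y => if y = (g.length : Int) then rk v + 1 else rk y, ?_⟩
    intro y hy0 hyl hnr
    rw [hlen] at hyl
    by_cases h : y < (g.length : Int)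
    · rw [par_append_lt g v y hy0 h] at hnr ⊢
      obtain ⟨h0, hl⟩ := hinv.1 y hy0 h
      simp only []
      rw [if_neg (by omega : ¬ par g y = (g.length : Int)), if_neg (by omega : ¬ y = (g.length : Int))]
      exact hrk y hy0 h hnr
    · have hy : y = (g.length : Int) := by omega
      subst hy
      rw [par_append_self g v] at hnr ⊢
      simp only []
      split_ifs <;> omega
  have hold : ∀ y, 0 ≤ y → y < (g.length : Int) → rootU (g ++ [v]) y = rootU g y := by
    intro y hy0 hyl
    obtain ⟨rk, hrk⟩ := hinv.2
    obtain ⟨k, hk, hroot, hk0, hkl⟩ := depth_lt g rk hinv.1 hrk y hy0 hyl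
    have h1 : iterP (g ++ [v]) k y = iterP g k y := iterP_append g v hinv.1 k y hy0 hyl
    have h2 : isRootP (g ++ [v]) (iterP (g ++ [v]) k y) := by
      rw [h1]
      show par (g ++ [v]) _ = _
      rw [par_append_lt g v _ hk0 hkl]
      exact hroot
    rw [rootU_eq_iter (g ++ [v]) hinv' y hy0 (by rw [hlen]; omega) k h2, h1,
      rootU_eq_iter g hinv y hy0 hyl k hroot]
  refine ⟨hinv', hold, ?_⟩
  by_cases h : v = (g.length : Int)
  · rw [if_pos h]
    apply rootU_of_isRoot
    show par _ _ = _
    rw [par_append_self g v, h]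
  · rw [if_neg h]
    have hvl' : v < (g.length : Int) := by omega
    have h1 : rootU (g ++ [v]) (g.length : Int) = rootU (g ++ [v]) (par (g ++ [v]) (g.length : Int)) := by
      rw [rootU_par (g ++ [v]) hinv' (g.length : Int) (by omega) (by rw [hlen]; omega)]
    rw [h1, par_append_self g v, hold v hv0 hvl']

def LabB (lab : List Int) : Prop :=
  ∀ j : Int, 0 ≤ j → j < (lab.length : Int) → 0 ≤ labv lab j ∧ labv lab j < (lab.length : Int)

def Ker (g lab : List Int) : Prop :=
  ∀ a b : Int, 0 ≤ a → a < (g.length : Int) → 0 ≤ b → b < (g.length : Int) →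
    (rootU g a = rootU g b ↔ labv lab a = labv lab b)

def PInner (n : Nat) (i vm cur : Int) (g lab : List Int) : Prop :=
  g.length = n ∧ lab.length = n ∧ InvU g ∧ LabB lab ∧ Ker g lab ∧
  labv lab i = cur ∧ rootU g i = rootU g vm

theorem merge_kernel (Ra Rb La Lb r1 r2 old cur : Int)
    (h : Ra = Rb ↔ La = Lb) (ha1 : Ra = r1 ↔ La = cur) (hb1 : Rb = r1 ↔ Lb = cur)
    (ha2 : Ra = r2 ↔ La = old) (hb2 : Rb = r2 ↔ Lb = old)
    (h12 : r1 ≠ r2) (hoc : old ≠ cur) :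
    ((if Ra = r1 then r2 else Ra) = (if Rb = r1 then r2 else Rb)) ↔
      ((if La = old then cur else La) = (if Lb = old then cur else Lb)) := by
  split_ifs <;> omega

theorem labv_map (lab : List Int) (f : Int → Int) (y : Int) (hy0 : 0 ≤ y)
    (hyl : y < (lab.length : Int)) : labv (lab.map f) y = f (labv lab y) := by
  unfold labv
  rw [PySem.List.pyGetD_of_nonneg _ _ hy0, PySem.List.pyGetD_of_nonneg _ _ hy0]
  rw [List.getD_eq_getElem?_getD, List.getD_eq_getElem?_getD, List.getElem?_map]
  have h : y.toNat < lab.length := by omega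
  rw [List.getElem?_eq_getElem h]
  simp

theorem inner_step (d : PySem.Dict Int Int) (m mm2 i vm cur : Int) (n : Nat)
    (hi0 : 0 ≤ i) (hil : i < (n : Int)) (hvm0 : 0 ≤ vm) (hvml : vm < (n : Int))
    (hm : d.get? m = some vm)
    (hvals : ∀ k v, d.get? k = some v → 0 ≤ v ∧ v < (n : Int))
    (g lab : List Int) (hP : PInner n i vm cur g lab) :
    PInner n i vm cur (stepNbrA d m g mm2) (stepNbrB d cur lab mm2) := by
  obtain ⟨hgl, hll, hinv, hlb, hker, hcur, hivm⟩ := hP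
  cases hd : d.get? mm2 with
  | none =>
    have e1 : stepNbrA d m g mm2 = g := by unfold stepNbrA; rw [hd]
    have e2 : stepNbrB d cur lab mm2 = lab := by unfold stepNbrB; rw [hd]
    rw [e1, e2]
    exact ⟨hgl, hll, hinv, hlb, hker, hcur, hivm⟩
  | some t2 =>
    obtain ⟨ht20, ht2l⟩ := hvals mm2 t2 hd
    obtain ⟨rk, hrk⟩ := hinv.2
    have hGd : d.getD m 0 = vm := PySem.Dict.getD_of_get?_eq_some d 0 hm
    have hvmg : vm < (g.length : Int) := by omega
    have ht2g : t2 < (g.length : Int) := by omega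
    have hig : i < (g.length : Int) := by omega
    -- first find
    have hfuel1 : ∃ k, k ≤ g.length ∧ isRootP g (iterP g k vm) := by
      obtain ⟨k, hk, hr, _, _⟩ := depth_lt g rk hinv.1 hrk vm hvm0 hvmg
      exact ⟨k, by omega, hr⟩
    obtain ⟨f11, f12, f13, f14, f15, _⟩ :=
      findA_spec g.length g vm rk hinv.1 hrk hvm0 hvmg hfuel1
    set r1 := (findA g.length g vm).1 with hr1def
    set g1 := (findA g.length g vm).2 with hg1def
    have hinv1 : InvU g1 := ⟨f13, rk, f14⟩
    -- second find
    have ht2g1 : t2 < (g1.length : Int) := by rw [f12]; omega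
    have hfuel2 : ∃ k, k ≤ g1.length ∧ isRootP g1 (iterP g1 k t2) := by
      obtain ⟨k, hk, hr, _, _⟩ := depth_lt g1 rk f13 f14 t2 ht20 ht2g1
      exact ⟨k, by omega, hr⟩
    obtain ⟨f21, f22, f23, f24, f25, _⟩ :=
      findA_spec g1.length g1 t2 rk f13 f14 ht20 ht2g1 hfuel2
    set r2 := (findA g1.length g1 t2).1 with hr2def
    set g2 := (findA g1.length g1 t2).2 with hg2def
    have hinv2 : InvU g2 := ⟨f23, rk, f24⟩
    have hlen2 : g2.length = n := by rw [f22, f12, hgl]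
    have hroots2 : ∀ y, 0 ≤ y → rootU g2 y = rootU g y := by
      intro y hy0; rw [f25 y hy0, f15 y hy0]
    have hr1v : r1 = rootU g vm := f11
    have hr2v : r2 = rootU g t2 := by rw [f21, f15 t2 ht20]
    -- the merge tests agree
    have hA : stepNbrA d m g mm2 =
        (if r1 ≠ r2 then PySem.List.pySetD g2 r1 r2 else g2) := by
      unfold stepNbrA
      rw [hd]
      simp only [hGd]
      rfl
    have hB : stepNbrB d cur lab mm2 =
        (if labv lab t2 ≠ cur then lab.map (fun l => if l = labv lab t2 then cur else l)
         else lab) := by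
      unfold stepNbrB
      rw [hd]
      rfl
    have htest : r1 = r2 ↔ labv lab t2 = cur := by
      rw [hr1v, hr2v, ← hivm]
      rw [hker i t2 hi0 hig ht20 ht2g, hcur]
      constructor <;> intro h <;> omega
    rw [hA, hB]
    by_cases hmerge : labv lab t2 = cur
    · have hr12 : r1 = r2 := htest.mpr hmerge
      rw [if_neg (by simpa using hr12), if_neg (by simpa using hmerge)]
      refine ⟨hlen2, hll, hinv2, hlb, ?_, hcur, ?_⟩
      · intro a b ha0 hal hb0 hbl
        rw [hlen2] at hal hbl
        rw [hroots2 a ha0, hroots2 b hb0]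
        exact hker a b ha0 (by omega) hb0 (by omega)
      · rw [hroots2 i hi0, hroots2 vm hvm0]; exact hivm
    · have hr12 : r1 ≠ r2 := fun h => hmerge (htest.mp h)
      rw [if_pos (by simpa using hr12), if_pos (by simpa using hmerge)]
      -- union on g2
      have hr1b := rootU_spec g2 hinv2 vm hvm0 (by omega)
      have hr2b := rootU_spec g2 hinv2 t2 ht20 (by omega)
      have hr1g2 : rootU g2 vm = r1 := by rw [hroots2 vm hvm0, hr1v]
      have hr2g2 : rootU g2 t2 = r2 := by rw [hroots2 t2 ht20, hr2v]
      rw [hr1g2] at hr1b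
      rw [hr2g2] at hr2b
      obtain ⟨u1, u2, u3⟩ := union_spec g2 r1 r2 hinv2 hr1b.2.1 (by omega)
        hr2b.2.1 (by omega) hr1b.1 hr2b.1 hr12
      have hroots3 : ∀ y, 0 ≤ y → rootU (PySem.List.pySetD g2 r1 r2) y =
          if rootU g y = r1 then r2 else rootU g y := by
        intro y hy0
        rw [u3 y hy0, hroots2 y hy0]
      set old := labv lab t2 with holddef
      have hlabm : ∀ y : Int, 0 ≤ y → y < (n : Int) →
          labv (lab.map (fun l => if l = old then cur else l)) y =
            if labv lab y = old then cur else labv lab y := by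
        intro y hy0 hyl
        exact labv_map lab _ y hy0 (by omega)
      have hkmain : ∀ a b : Int, 0 ≤ a → a < (n:Int) → 0 ≤ b → b < (n:Int) →
          ((if rootU g a = r1 then r2 else rootU g a) =
            (if rootU g b = r1 then r2 else rootU g b) ↔
          (if labv lab a = old then cur else labv lab a) =
            (if labv lab b = old then cur else labv lab b)) := by
        intro a b ha0 hal hb0 hbl
        refine merge_kernel _ _ _ _ _ _ _ _ ?_ ?_ ?_ ?_ ?_ hr12 hmerge
        · exact hker a b ha0 (by omega) hb0 (by omega)
        · rw [hr1v, ← hivm, hker a i ha0 (by omega) hi0 (by omega), hcur]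
        · rw [hr1v, ← hivm, hker b i hb0 (by omega) hi0 (by omega), hcur]
        · rw [hr2v, hker a t2 ha0 (by omega) ht20 (by omega), holddef]
        · rw [hr2v, hker b t2 hb0 (by omega) ht20 (by omega), holddef]
      refine ⟨by rw [u1, hlen2], by simp [hll], u2, ?_, ?_, ?_, ?_⟩
      · intro j hj0 hjl
        have hlenm : ((lab.map (fun l => if l = old then cur else l)).length : Int) = (n : Int) := by
          simp [hll]
        rw [hlenm] at hjl ⊢
        rw [hlabm j hj0 hjl]
        have hbj := hlb j hj0 (by omega)
        have hbi := hlb i hi0 (by omega)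
        rw [hll] at hbj hbi
        rw [hcur] at hbi
        split_ifs <;> omega
      · intro a b ha0 hal hb0 hbl
        rw [show ((PySem.List.pySetD g2 r1 r2).length : Int) = (n:Int) from by rw [u1, hlen2]] at hal hbl
        rw [hroots3 a ha0, hroots3 b hb0, hlabm a ha0 hal, hlabm b hb0 hbl]
        exact hkmain a b ha0 hal hb0 hbl
      · rw [hlabm i hi0 (by omega), hcur, if_neg (fun h => hmerge h.symm)]
      · rw [hroots3 i hi0, hroots3 vm hvm0, hivm]

def RelS (d : PySem.Dict Int Int) (g lab : List Int) : Prop :=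
  g.length = lab.length ∧ InvU g ∧
  (∀ k v, d.get? k = some v → 0 ≤ v ∧ v < (g.length : Int)) ∧ LabB lab ∧ Ker g lab

theorem foldl_two {α β γ : Type} (P : α → β → Prop) (fA : α → γ → α) (fB : β → γ → β)
    (l : List γ) (hstep : ∀ a b x, P a b → P (fA a x) (fB b x)) :
    ∀ a b, P a b → P (l.foldl fA a) (l.foldl fB b) := by
  induction l with
  | nil => intro a b h; exact h
  | cons x xs ih => intro a b h; exact ih _ _ (hstep a b x h)

-- PInner at the start of the neighbour loop, mask already present with value v
theorem pinner_init_present (d : PySem.Dict Int Int) (g lab : List Int) (v : Int)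
    (hlen : g.length = lab.length) (hinv : InvU g) (hlb : LabB lab) (hker : Ker g lab)
    (hv0 : 0 ≤ v) (hvl : v < (g.length : Int)) :
    PInner (g.length + 1) (g.length : Int) v (labv lab v)
      (g ++ [v]) (lab ++ [labv lab v]) := by
  obtain ⟨hai, har, hat⟩ := append_spec g v hinv hv0 (by omega)
  have hrt : rootU (g ++ [v]) (g.length : Int) = rootU g v := by
    rw [hat, if_neg (by omega)]
  have hlv := hlb v hv0 (by omega)
  rw [← hlen] at hlv
  have hlabv : ∀ y : Int, 0 ≤ y → y < (g.length : Int) →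
      labv (lab ++ [labv lab v]) y = labv lab y := by
    intro y hy0 hyl
    exact pyGetD_append_lt lab _ y 0 hy0 (by omega)
  have hlabt : labv (lab ++ [labv lab v]) (g.length : Int) = labv lab v := by
    unfold labv
    rw [hlen]
    exact pyGetD_append_self lab _ 0
  have hrb : ∀ y : Int, 0 ≤ y → y < (g.length : Int) →
      0 ≤ rootU g y ∧ rootU g y < (g.length : Int) := by
    intro y hy0 hyl
    exact (rootU_spec g hinv y hy0 hyl).2
  refine ⟨by simp, by simp [hlen], hai, ?_, ?_, hlabt, ?_⟩
  · -- LabB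
    intro j hj0 hjl
    simp only [List.length_append, List.length_cons, List.length_nil] at hjl
    by_cases h : j < (lab.length : Int)
    · have := hlb j hj0 h
      rw [show labv (lab ++ [labv lab v]) j = labv lab j from
        pyGetD_append_lt lab _ j 0 hj0 h]
      constructor
      · omega
      · simp only [List.length_append, List.length_cons, List.length_nil]
        omega
    · have hj : j = (lab.length : Int) := by omega
      rw [hj, show labv (lab ++ [labv lab v]) (lab.length : Int) = labv lab v from
        pyGetD_append_self lab _ 0]
      simp only [List.length_append, List.length_cons, List.length_nil]
      omega
  · -- Ker
    intro a b ha0 hal hb0 hbl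
    simp only [List.length_append, List.length_cons, List.length_nil] at hal hbl
    by_cases hca : a < (g.length : Int) <;> by_cases hcb : b < (g.length : Int)
    · rw [har a ha0 hca, har b hb0 hcb, hlabv a ha0 hca, hlabv b hb0 hcb]
      exact hker a b ha0 hca hb0 hcb
    · have hb : b = (g.length : Int) := by omega
      rw [hb, har a ha0 hca, hrt, hlabv a ha0 hca, hlabt]
      exact hker a v ha0 hca hv0 hvl
    · have ha : a = (g.length : Int) := by omega
      rw [ha, har b hb0 hcb, hrt, hlabv b hb0 hcb, hlabt]
      exact hker v b hv0 hvl hb0 hcb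
    · have ha : a = (g.length : Int) := by omega
      have hb : b = (g.length : Int) := by omega
      rw [ha, hb]
      simp
  · -- root link
    rw [hrt]
    have : rootU (g ++ [v]) v = rootU g v := har v hv0 hvl
    rw [this]

-- PInner at the start of the neighbour loop, new mask
theorem pinner_init_new (d : PySem.Dict Int Int) (g lab : List Int)
    (hlen : g.length = lab.length) (hinv : InvU g) (hlb : LabB lab) (hker : Ker g lab) :
    PInner (g.length + 1) (g.length : Int) (g.length : Int) (g.length : Int)
      (g ++ [(g.length : Int)]) (lab ++ [(g.length : Int)]) := by
  obtain ⟨hai, har, hat⟩ := append_spec g (g.length : Int) hinv (by omega) (by omega)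
  have hrt : rootU (g ++ [(g.length : Int)]) (g.length : Int) = (g.length : Int) := by
    rw [hat, if_pos rfl]
  have hlabv : ∀ y : Int, 0 ≤ y → y < (g.length : Int) →
      labv (lab ++ [(g.length : Int)]) y = labv lab y := by
    intro y hy0 hyl
    exact pyGetD_append_lt lab _ y 0 hy0 (by omega)
  have hlabt : labv (lab ++ [(g.length : Int)]) (g.length : Int) = (g.length : Int) := by
    unfold labv
    rw [hlen]
    exact pyGetD_append_self lab _ 0
  have hrb : ∀ y : Int, 0 ≤ y → y < (g.length : Int) →
      0 ≤ rootU g y ∧ rootU g y < (g.length : Int) := by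
    intro y hy0 hyl
    exact (rootU_spec g hinv y hy0 hyl).2
  refine ⟨by simp, by simp [hlen], hai, ?_, ?_, hlabt, rfl⟩
  · intro j hj0 hjl
    simp only [List.length_append, List.length_cons, List.length_nil] at hjl
    by_cases h : j < (lab.length : Int)
    · have := hlb j hj0 h
      rw [show labv (lab ++ [(g.length : Int)]) j = labv lab j from
        pyGetD_append_lt lab _ j 0 hj0 h]
      constructor
      · omega
      · simp only [List.length_append, List.length_cons, List.length_nil]
        omega
    · have hj : j = (lab.length : Int) := by omega
      rw [hj, ← hlen, hlabt]  -- careful: j = lab.length, but hlabt is at g.length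
      simp only [List.length_append, List.length_cons, List.length_nil]
      omega
  · intro a b ha0 hal hb0 hbl
    simp only [List.length_append, List.length_cons, List.length_nil] at hal hbl
    by_cases hca : a < (g.length : Int) <;> by_cases hcb : b < (g.length : Int)
    · rw [har a ha0 hca, har b hb0 hcb, hlabv a ha0 hca, hlabv b hb0 hcb]
      exact hker a b ha0 hca hb0 hcb
    · have hb : b = (g.length : Int) := by omega
      rw [hb, har a ha0 hca, hrt, hlabv a ha0 hca, hlabt]
      have h1 := hrb a ha0 hca
      have h2 := hlb a ha0 (by omega)
      constructor
      · intro h; omega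
      · intro h; omega
    · have ha : a = (g.length : Int) := by omega
      rw [ha, har b hb0 hcb, hrt, hlabv b hb0 hcb, hlabt]
      have h1 := hrb b hb0 hcb
      have h2 := hlb b hb0 (by omega)
      constructor
      · intro h; omega
      · intro h; omega
    · have ha : a = (g.length : Int) := by omega
      have hb : b = (g.length : Int) := by omega
      rw [ha, hb]
      simp

theorem word_step (d : PySem.Dict Int Int) (g lab : List Int) (w : String)
    (hRel : RelS d g lab) :
    (stepWordA (d, g) ((g.length : Int), w)).1 = (stepWordB (d, lab) ((g.length : Int), w)).1 ∧
    RelS (stepWordA (d, g) ((g.length : Int), w)).1 (stepWordA (d, g) ((g.length : Int), w)).2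
      (stepWordB (d, lab) ((g.length : Int), w)).2 ∧
    (stepWordA (d, g) ((g.length : Int), w)).2.length = g.length + 1 := by
  obtain ⟨hlen, hinv, hvals, hlb, hker⟩ := hRel
  cases hc : d.get? (maskOf w) with
  | some v =>
    obtain ⟨hv0, hvl⟩ := hvals (maskOf w) v hc
    have hdA : d.setdefault (maskOf w) ((g.length : Int)) = d := by
      apply PySem.Dict.setdefault_of_contains
      rw [PySem.Dict.contains_eq_isSome_get?, hc]
      rfl
    have hSA : stepWordA (d, g) ((g.length : Int), w) =
        (d, (connectedList (maskOf w)).foldl (stepNbrA d (maskOf w)) (g ++ [v])) := by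
      simp only [stepWordA, hc, hdA, Option.getD_some]
    have hSB : stepWordB (d, lab) ((g.length : Int), w) =
        (d, (connectedList (maskOf w)).foldl
          (stepNbrB d (labv (lab ++ [labv lab v]) (g.length : Int)))
          (lab ++ [labv lab v])) := by
      simp only [stepWordB, hc]; rfl
    have hcurv : labv (lab ++ [labv lab v]) (g.length : Int) = labv lab v := by
      unfold labv; rw [hlen]; exact pyGetD_append_self lab _ 0
    have hP0 := pinner_init_present d g lab v hlen hinv hlb hker hv0 hvl
    have hvals' : ∀ k u, d.get? k = some u → 0 ≤ u ∧ u < ((g.length + 1 : Nat) : Int) := by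
      intro k u hk
      have := hvals k u hk
      exact ⟨this.1, by push_cast; omega⟩
    have hPfin := foldl_two
      (PInner (g.length + 1) (g.length : Int) v (labv lab v))
      (stepNbrA d (maskOf w)) (stepNbrB d (labv lab v))
      (connectedList (maskOf w))
      (fun a b x hP => inner_step d (maskOf w) x (g.length : Int) v (labv lab v)
        (g.length + 1) (by omega) (by push_cast; omega) hv0 (by push_cast; omega)
        hc hvals' a b hP)
      (g ++ [v]) (lab ++ [labv lab v]) hP0
    rw [hSA, hSB, hcurv]
    obtain ⟨p1, p2, p3, p4, p5, _, _⟩ := hPfin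
    refine ⟨rfl, ⟨by rw [p1, p2], p3, ?_, p4, p5⟩, p1⟩
    · intro k u hk
      have := hvals k u hk
      rw [p1]
      exact ⟨this.1, by push_cast; omega⟩
  | none =>
    have hdA : d.setdefault (maskOf w) ((g.length : Int)) = d.insert (maskOf w) (g.length : Int) := by
      apply PySem.Dict.setdefault_of_not_contains
      rw [PySem.Dict.contains_eq_isSome_get?, hc]
      rfl
    have hSA : stepWordA (d, g) ((g.length : Int), w) =
        (d.insert (maskOf w) (g.length : Int),
         (connectedList (maskOf w)).foldl
           (stepNbrA (d.insert (maskOf w) (g.length : Int)) (maskOf w))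
           (g ++ [(g.length : Int)])) := by
      simp only [stepWordA, hc, hdA, Option.getD_none]
    have hSB : stepWordB (d, lab) ((g.length : Int), w) =
        (d.insert (maskOf w) (g.length : Int),
         (connectedList (maskOf w)).foldl
           (stepNbrB (d.insert (maskOf w) (g.length : Int))
             (labv (lab ++ [(g.length : Int)]) (g.length : Int)))
           (lab ++ [(g.length : Int)])) := by
      simp only [stepWordB, hc]; rfl
    have hcurv : labv (lab ++ [(g.length : Int)]) (g.length : Int) = (g.length : Int) := by
      unfold labv; rw [hlen]; exact pyGetD_append_self lab _ 0
    have hP0 := pinner_init_new d g lab hlen hinv hlb hker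
    have hvals' : ∀ k u, (d.insert (maskOf w) (g.length : Int)).get? k = some u →
        0 ≤ u ∧ u < ((g.length + 1 : Nat) : Int) := by
      intro k u hk
      rw [PySem.Dict.get?_insert] at hk
      by_cases hkm : k = maskOf w
      · rw [if_pos hkm] at hk
        have : u = (g.length : Int) := by injection hk; omega
        exact ⟨by omega, by push_cast; omega⟩
      · rw [if_neg hkm] at hk
        have := hvals k u hk
        exact ⟨this.1, by push_cast; omega⟩
    have hm' : (d.insert (maskOf w) (g.length : Int)).get? (maskOf w) = some (g.length : Int) :=
      PySem.Dict.get?_insert_self d (maskOf w) (g.length : Int)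
    have hPfin := foldl_two
      (PInner (g.length + 1) (g.length : Int) (g.length : Int) (g.length : Int))
      (stepNbrA (d.insert (maskOf w) (g.length : Int)) (maskOf w))
      (stepNbrB (d.insert (maskOf w) (g.length : Int)) (g.length : Int))
      (connectedList (maskOf w))
      (fun a b x hP => inner_step (d.insert (maskOf w) (g.length : Int)) (maskOf w) x
        (g.length : Int) (g.length : Int) (g.length : Int)
        (g.length + 1) (by omega) (by push_cast; omega) (by omega) (by push_cast; omega)
        hm' hvals' a b hP)
      (g ++ [(g.length : Int)]) (lab ++ [(g.length : Int)]) hP0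
    rw [hSA, hSB, hcurv]
    obtain ⟨p1, p2, p3, p4, p5, _, _⟩ := hPfin
    refine ⟨rfl, ⟨by rw [p1, p2], p3, ?_, p4, p5⟩, p1⟩
    · intro k u hk
      have := hvals' k u hk
      rw [p1]
      exact this

theorem outer_loop (ws : List String) :
    ∀ d g lab, RelS d g lab →
    ((PySem.List.enumerate ws (g.length : Int)).foldl stepWordA (d, g)).1 =
      ((PySem.List.enumerate ws (g.length : Int)).foldl stepWordB (d, lab)).1 ∧
    RelS ((PySem.List.enumerate ws (g.length : Int)).foldl stepWordA (d, g)).1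
      ((PySem.List.enumerate ws (g.length : Int)).foldl stepWordA (d, g)).2
      ((PySem.List.enumerate ws (g.length : Int)).foldl stepWordB (d, lab)).2 ∧
    ((PySem.List.enumerate ws (g.length : Int)).foldl stepWordA (d, g)).2.length =
      g.length + ws.length := by
  induction ws with
  | nil =>
    intro d g lab hRel
    simp only [PySem.List.enumerate_nil, List.foldl_nil, List.length_nil]
    exact ⟨trivial, hRel, by omega⟩
  | cons w ws ih =>
    intro d g lab hRel
    rw [PySem.List.enumerate_cons]
    simp only [List.foldl_cons]
    obtain ⟨h1, h2, h3⟩ := word_step d g lab w hRel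
    set stA := stepWordA (d, g) ((g.length : Int), w) with hstA
    set stB := stepWordB (d, lab) ((g.length : Int), w) with hstB
    have hBpair : stB = (stA.1, stB.2) := by
      rw [h1]
    have hApair : stA = (stA.1, stA.2) := rfl
    have hcast : (g.length : Int) + 1 = (stA.2.length : Int) := by
      rw [h3]; push_cast; omega
    rw [hBpair, hApair, hcast]
    obtain ⟨i1, i2, i3⟩ := ih stA.1 stA.2 stB.2 h2
    exact ⟨i1, i2, by rw [i3, h3]; simp; omega⟩

-- A's closing loop: the counted keys are exactly the final roots
theorem final_fold (l : List Int) :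
    ∀ (cnt : PySem.Dict Int Int) (g : List Int), InvU g →
    (∀ x ∈ l, 0 ≤ x ∧ x < (g.length : Int)) →
    (l.foldl (fun (p : PySem.Dict Int Int × List Int) i =>
        let pr := findA p.2.length p.2 i
        (p.1.modify pr.1 0 (· + 1), pr.2)) (cnt, g)).1 =
      (l.map (rootU g)).foldl (fun d r => d.modify r 0 (· + 1)) cnt := by
  induction l with
  | nil => intro cnt g _ _; rfl
  | cons x xs ih =>
    intro cnt g hinv hmem
    obtain ⟨hx0, hxl⟩ := hmem x (by simp)
    obtain ⟨rk, hrk⟩ := hinv.2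
    have hfuel : ∃ k, k ≤ g.length ∧ isRootP g (iterP g k x) := by
      obtain ⟨k, hk, hr, _, _⟩ := depth_lt g rk hinv.1 hrk x hx0 hxl
      exact ⟨k, by omega, hr⟩
    obtain ⟨f1, f2, f3, f4, f5, _⟩ := findA_spec g.length g x rk hinv.1 hrk hx0 hxl hfuel
    simp only [List.foldl_cons, List.map_cons]
    rw [f1]
    have hmem' : ∀ y ∈ xs, 0 ≤ y ∧ y < (((findA g.length g x).2).length : Int) := by
      intro y hy
      have := hmem y (by simp [hy])
      rw [f2]
      exact this
    rw [ih (cnt.modify (rootU g x) 0 (· + 1)) (findA g.length g x).2 ⟨f3, rk, f4⟩ hmem']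
    have hmapeq : xs.map (rootU (findA g.length g x).2) = xs.map (rootU g) := by
      apply List.map_congr_left
      intro y hy
      exact f5 y (hmem y (by simp [hy])).1
    rw [hmapeq]

-- first-occurrence representatives of the fibers of f over R
def dstep (f : Int → Int) (acc : List Int) (j : Int) : List Int :=
  if f j ∈ acc.map f then acc else acc ++ [j]

theorem set_ofList_map (f : Int → Int) (R : List Int) :
    ∀ acc : List Int,
      (R.map f).foldl PySem.Set.add (acc.map f) = (R.foldl (dstep f) acc).map f := by
  induction R with
  | nil => intro acc; rfl
  | cons j R ih =>
    intro acc
    simp only [List.map_cons, List.foldl_cons]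
    have hadd : PySem.Set.add (acc.map f) (f j) = (dstep f acc j).map f := by
      unfold PySem.Set.add dstep
      by_cases h : f j ∈ acc.map f
      · rw [if_pos (by simpa [PySem.Set.contains] using h), if_pos h]
      · rw [if_neg (by simpa [PySem.Set.contains] using h), if_neg h]
        simp
    rw [hadd, ih (dstep f acc j)]

theorem dsel_mem (f : Int → Int) (R : List Int) :
    ∀ acc, ∀ x ∈ R.foldl (dstep f) acc, x ∈ acc ∨ x ∈ R := by
  induction R with
  | nil => intro acc x hx; exact Or.inl hx
  | cons j R ih =>
    intro acc x hx
    rcases ih (dstep f acc j) x hx with h | h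
    · unfold dstep at h
      split_ifs at h
      · exact Or.inl h
      · rcases List.mem_append.mp h with h | h
        · exact Or.inl h
        · simp at h
          exact Or.inr (by simp [h])
    · exact Or.inr (by simp [h])

theorem dsel_congr (f h : Int → Int) (n : Int)
    (hker : ∀ a b : Int, 0 ≤ a → a < n → 0 ≤ b → b < n → (f a = f b ↔ h a = h b))
    (R : List Int) :
    ∀ acc, (∀ j ∈ R, 0 ≤ j ∧ j < n) → (∀ j ∈ acc, 0 ≤ j ∧ j < n) →
      R.foldl (dstep f) acc = R.foldl (dstep h) acc := by
  induction R with
  | nil => intro acc _ _; rfl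
  | cons j R ih =>
    intro acc hR hacc
    obtain ⟨hj0, hjn⟩ := hR j (by simp)
    have hcond : (f j ∈ acc.map f) ↔ (h j ∈ acc.map h) := by
      simp only [List.mem_map]
      constructor
      · rintro ⟨i, hi, he⟩
        obtain ⟨hi0, hin⟩ := hacc i hi
        exact ⟨i, hi, (hker i j hi0 hin hj0 hjn).mp he⟩
      · rintro ⟨i, hi, he⟩
        obtain ⟨hi0, hin⟩ := hacc i hi
        exact ⟨i, hi, (hker i j hi0 hin hj0 hjn).mpr he⟩
    simp only [List.foldl_cons]
    have hstepeq : dstep f acc j = dstep h acc j := by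
      unfold dstep
      by_cases hc : f j ∈ acc.map f
      · rw [if_pos hc, if_pos (hcond.mp hc)]
      · rw [if_neg hc, if_neg (fun hh => hc (hcond.mpr hh))]
    rw [hstepeq]
    apply ih (dstep h acc j) (fun x hx => hR x (by simp [hx]))
    intro x hx
    unfold dstep at hx
    split_ifs at hx
    · exact hacc x hx
    · rcases List.mem_append.mp hx with hh | hh
      · exact hacc x hh
      · simp at hh
        subst hh
        exact ⟨hj0, hjn⟩

theorem counter_kernel (n : Nat) (f h : Int → Int)
    (hker : ∀ a b : Int, 0 ≤ a → a < (n : Int) → 0 ≤ b → b < (n : Int) → (f a = f b ↔ h a = h b)) :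
    (PySem.Dict.counter ((PySem.List.pyRange 0 (n : Int) 1).map f)).values =
      (PySem.Dict.counter ((PySem.List.pyRange 0 (n : Int) 1).map h)).values ∧
    (PySem.Dict.counter ((PySem.List.pyRange 0 (n : Int) 1).map f)).size =
      (PySem.Dict.counter ((PySem.List.pyRange 0 (n : Int) 1).map h)).size := by
  set R := PySem.List.pyRange 0 (n : Int) 1 with hR
  have hRmem : ∀ j ∈ R, 0 ≤ j ∧ j < (n : Int) := by
    intro j hj
    rw [hR] at hj
    have := PySem.List.mem_pyRange_one.mp hj
    exact this
  have hof_f : PySem.Set.ofList (R.map f) = (R.foldl (dstep f) []).map f := by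
    rw [PySem.Set.ofList_eq_foldl]
    have := set_ofList_map f R []
    simpa using this
  have hof_h : PySem.Set.ofList (R.map h) = (R.foldl (dstep h) []).map h := by
    rw [PySem.Set.ofList_eq_foldl]
    have := set_ofList_map h R []
    simpa using this
  have hD : R.foldl (dstep f) [] = R.foldl (dstep h) [] :=
    dsel_congr f h (n : Int) hker R [] hRmem (by simp)
  set D := R.foldl (dstep f) [] with hDdef
  have hDmem : ∀ x ∈ D, 0 ≤ x ∧ x < (n : Int) := by
    intro x hx
    rcases dsel_mem f R [] x hx with hc | hc
    · simp at hc
    · exact hRmem x hc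
  have hcount : ∀ i ∈ D, (R.map f).count (f i) = (R.map h).count (h i) := by
    intro i hi
    obtain ⟨hi0, hin⟩ := hDmem i hi
    rw [List.count_eq_countP, List.count_eq_countP, List.countP_map, List.countP_map]
    apply List.countP_congr
    intro j hj
    obtain ⟨hj0, hjn⟩ := hRmem j hj
    simp only [Function.comp_apply, beq_iff_eq]
    exact hker j i hj0 hjn hi0 hin
  constructor
  · show ((PySem.Dict.counter (R.map f)).items).map (·.2) = ((PySem.Dict.counter (R.map h)).items).map (·.2)
    rw [PySem.Dict.items_counter, PySem.Dict.items_counter, hof_f, hof_h, ← hD]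
    simp only [List.map_map]
    apply List.map_congr_left
    intro i hi
    simp only [Function.comp_apply]
    exact_mod_cast hcount i hi
  · show ((PySem.Dict.counter (R.map f)).items).length = ((PySem.Dict.counter (R.map h)).items).length
    rw [PySem.Dict.items_counter, PySem.Dict.items_counter, hof_f, hof_h, ← hD]
    simp

theorem main_eq (words : List String) : groupStrings2 words = groupStrings2_alt words := by
  have hRel0 : RelS PySem.Dict.empty ([] : List Int) ([] : List Int) := by
    refine ⟨rfl, ⟨?_, ⟨fun _ => 0, ?_⟩⟩, ?_, ?_, ?_⟩
    · intro x h1 h2; simp at h2; omega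
    · intro x h1 h2; simp at h2; omega
    · intro k v hk; rw [PySem.Dict.get?_empty] at hk; cases hk
    · intro j h1 h2; simp at h2; omega
    · intro a b h1 h2; simp at h2; omega
  have henum : PySem.List.enumerate words (0 : Int) =
      PySem.List.enumerate words ((([] : List Int).length : Int)) := by norm_num
  obtain ⟨hdicts, hRelF, hlenF⟩ :=
    outer_loop words PySem.Dict.empty ([] : List Int) ([] : List Int) hRel0
  rw [← henum] at hdicts hRelF hlenF
  set stA := (PySem.List.enumerate words (0 : Int)).foldl stepWordA (PySem.Dict.empty, ([] : List Int)) with hstA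
  set stB := (PySem.List.enumerate words (0 : Int)).foldl stepWordB (PySem.Dict.empty, ([] : List Int)) with hstB
  obtain ⟨hlen, hinvF, _, hlbF, hkerF⟩ := hRelF
  have hn : stA.2.length = words.length := by rw [hlenF]; simp
  have hnB : stB.2.length = words.length := by omega
  -- A's final counter
  have hmemR : ∀ x ∈ PySem.List.pyRange 0 (words.length : Int) 1, 0 ≤ x ∧ x < ((stA.2).length : Int) := by
    intro x hx
    have := PySem.List.mem_pyRange_one.mp hx
    rw [hn]
    exact this
  have hA := final_fold (PySem.List.pyRange 0 (words.length : Int) 1)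
    PySem.Dict.empty stA.2 hinvF hmemR
  -- B's counter over the final labels, rewritten as a map over the same range
  have hBlist : stB.2 = (PySem.List.pyRange 0 (words.length : Int) 1).map (fun j => labv stB.2 j) := by
    have h0 := PySem.List.map_pyGetD_pyRange_zero stB.2 (0 : Int)
    have hlen2 : PySem.List.len stB.2 = ((words.length : Nat) : Int) := by
      simp [PySem.List.len, hnB]
    rw [hlen2] at h0
    exact h0.symm
  have hker' : ∀ a b : Int, 0 ≤ a → a < ((words.length : Nat) : Int) → 0 ≤ b → b < ((words.length : Nat) : Int) →
      (rootU stA.2 a = rootU stA.2 b ↔ labv stB.2 a = labv stB.2 b) := by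
    intro a b ha0 hal hb0 hbl
    exact hkerF a b ha0 (by omega) hb0 (by omega)
  obtain ⟨hvaleq, hsizeeq⟩ := counter_kernel words.length (rootU stA.2) (labv stB.2) hker'
  show [_, _] = [_, _]
  rw [hA]
  rw [← PySem.Dict.counter_eq_foldl]
  rw [hBlist]
  rw [hvaleq, hsizeeq]

-- ===== VERDICT (by name: the statement is the Claim_ definition above) =====
theorem groupStrings2_spec : Claim_equal_groupStrings2 := by
  intro words _ _
  exact main_eq words
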